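-- pv_equiv track=rewrite | github.com/seckinadali/google-foobar | 3a_queue_to_do/solution.py | solution
-- ===== SOURCE A (Python) =====
-- def xor_till(n):
--     '''Returns the XOR product of integers from 1 to n
--     '''
--     if n % 4 == 0:
--         return n
--     elif n % 4 == 1:
--         return 1
--     elif n % 4 == 2:
--         return n + 1
--     else:
--         return 0
--
-- def xor_between(m, n):
--     '''Returns the XOR product of integers from m to n
--     '''
--     return xor_till(m - 1) ^ xor_till(n)
--
-- def solution(start, length):
--     A = []
--     for i in range(length):
--         first = start + i * length
--         last = first + length - i - 1
--         A.append(xor_between(first, last))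
--
--     res = 0
--     for i in A:
--         res = res ^ i
--
--     return res
-- ===== SOURCE B (Python) =====
-- def solution(start, length):
--     res = 0
--     for i in range(length):
--         lo = start + i * length
--         hi = lo + length - 1 - i
--         if lo % 2 == 1:
--             res ^= lo
--             lo += 1
--         if hi % 2 == 0:
--             res ^= hi
--             hi -= 1
--         # [lo, hi] is now a run of (even, odd) pairs; each pair XORs to 1
--         if lo <= hi and ((hi + 1 - lo) // 2) % 2 == 1:
--             res ^= 1
--     return res
-- ===== Notes on version B (the rewrite author's own statement) =====
-- stated objective: alternative
-- what changed: Replaced the xor_till n%4 prefix-XOR lookup table and the intermediate list by a single accumulator that XORs each diagonal range directly from its endpoints: trim an odd low / even high endpoint, then XOR in the parity of the number of remaining (even,odd) pairs, each of which XORs to 1.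
import Mathlib
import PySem

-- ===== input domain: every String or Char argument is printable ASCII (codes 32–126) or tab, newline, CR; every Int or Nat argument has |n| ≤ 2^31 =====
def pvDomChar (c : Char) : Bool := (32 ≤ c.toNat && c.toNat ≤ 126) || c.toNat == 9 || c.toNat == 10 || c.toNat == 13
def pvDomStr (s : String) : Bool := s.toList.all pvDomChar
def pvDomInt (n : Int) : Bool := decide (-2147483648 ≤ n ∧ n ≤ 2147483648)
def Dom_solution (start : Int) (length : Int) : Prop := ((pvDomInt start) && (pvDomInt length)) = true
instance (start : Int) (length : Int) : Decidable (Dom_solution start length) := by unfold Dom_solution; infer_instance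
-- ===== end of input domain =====

-- B replaces the xor_till n%4 prefix-XOR table and the intermediate list by one accumulator
-- that XORs each diagonal range from its endpoints (trim odd low / even high, then the parity
-- of the remaining (even,odd) pair count): an alternative same-cost algorithm.

-- ===== PORT A =====
def xorTill (n : Int) : Int :=
  if PySem.Int.mod n 4 = 0 then n
  else if PySem.Int.mod n 4 = 1 then 1
  else if PySem.Int.mod n 4 = 2 then n + 1
  else 0

def xorBetween (m n : Int) : Int := PySem.Int.bxor (xorTill (m - 1)) (xorTill n)

def solution (start : Int) (length : Int) : Int :=
  let A := (PySem.List.pyRange 0 length 1).foldl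
    (fun acc i => acc ++ [xorBetween (start + i * length) (start + i * length + length - i - 1)]) []
  A.foldl (fun res i => PySem.Int.bxor res i) 0

-- ===== PORT B =====
def solution_alt (start : Int) (length : Int) : Int :=
  (PySem.List.pyRange 0 length 1).foldl
    (fun res i =>
      let lo := start + i * length
      let hi := lo + length - 1 - i
      let res := if PySem.Int.mod lo 2 = 1 then PySem.Int.bxor res lo else res
      let lo := if PySem.Int.mod lo 2 = 1 then lo + 1 else lo
      let res := if PySem.Int.mod hi 2 = 0 then PySem.Int.bxor res hi else res
      let hi := if PySem.Int.mod hi 2 = 0 then hi - 1 else hi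
      if lo ≤ hi ∧ PySem.Int.mod (PySem.Int.floordiv (hi + 1 - lo) 2) 2 = 1
      then PySem.Int.bxor res 1 else res) 0

-- ===== PRECONDITION & SPEC =====
def Spec_solution (start : Int) (length : Int) (out : Int) : Prop := out = solution_alt start length
instance (start : Int) (length : Int) (out : Int) : Decidable (Spec_solution start length out) := by unfold Spec_solution; infer_instance

-- ===== CLAIM (what is proved, stated in full; the proofs are below) =====
def Claim_equal_solution : Prop := ∀ (start : Int) (length : Int), Dom_solution start length → Spec_solution start length (solution start length)

-- ===== LEMMAS AND PROOFS =====

theorem bxor_natCast_negSucc (m n : Nat) :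
    PySem.Int.bxor (m : Int) (Int.negSucc n) = Int.negSucc (m ^^^ n) := by
  simp [PySem.Int.bxor, Int.negSucc_eq]
  omega

theorem bxor_negSucc_natCast (m n : Nat) :
    PySem.Int.bxor (Int.negSucc m) (n : Int) = Int.negSucc (m ^^^ n) := by
  simp [PySem.Int.bxor, Int.negSucc_eq]
  omega

theorem bxor_negSucc_negSucc (m n : Nat) :
    PySem.Int.bxor (Int.negSucc m) (Int.negSucc n) = ((m ^^^ n : Nat) : Int) := by
  simp [PySem.Int.bxor, Int.negSucc_eq]
  split_ifs <;> first | rfl | (exfalso; omega)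

theorem bxor_assoc (a b c : Int) :
    PySem.Int.bxor (PySem.Int.bxor a b) c = PySem.Int.bxor a (PySem.Int.bxor b c) := by
  cases a <;> cases b <;> cases c <;>
    simp [PySem.Int.bxor_natCast, bxor_natCast_negSucc, bxor_negSucc_natCast,
      bxor_negSucc_negSucc, Int.ofNat_eq_natCast, Nat.xor_assoc]

theorem zero_bxor (a : Int) : PySem.Int.bxor 0 a = a := by
  rw [PySem.Int.bxor_comm, PySem.Int.bxor_zero]

theorem nat_two_mul_xor_succ (a : Nat) : (2 * a) ^^^ (2 * a + 1) = 1 := by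
  have h := Nat.xor_bit false a true a
  simpa [Nat.bit, Nat.xor_self] using h

theorem bxor_two_mul_succ (k : Int) : PySem.Int.bxor (2 * k) (2 * k + 1) = 1 := by
  cases k with
  | ofNat a =>
      have h2 : (2 : Int) * Int.ofNat a + 1 = ((2 * a + 1 : Nat) : Int) := by
        simp only [Int.ofNat_eq_natCast]; omega
      have h1 : (2 : Int) * Int.ofNat a = ((2 * a : Nat) : Int) := by
        simp only [Int.ofNat_eq_natCast]; omega
      rw [h2, h1, PySem.Int.bxor_natCast, nat_two_mul_xor_succ, Nat.cast_one]
  | negSucc b =>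
      have h2 : (2 : Int) * Int.negSucc b + 1 = Int.negSucc (2 * b) := by
        rw [Int.negSucc_eq, Int.negSucc_eq]; push_cast; ring
      have h1 : (2 : Int) * Int.negSucc b = Int.negSucc (2 * b + 1) := by
        rw [Int.negSucc_eq, Int.negSucc_eq]; push_cast; ring
      rw [h2, h1, bxor_negSucc_negSucc, Nat.xor_comm, nat_two_mul_xor_succ, Nat.cast_one]

theorem bxor_one_two_mul (k : Int) : PySem.Int.bxor 1 (2 * k) = 2 * k + 1 := by
  conv_lhs => rw [← bxor_two_mul_succ k]
  rw [PySem.Int.bxor_comm (2 * k) (2 * k + 1), bxor_assoc, PySem.Int.bxor_self,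
    PySem.Int.bxor_zero]

theorem till_step (n : Int) : PySem.Int.bxor (xorTill (n - 1)) n = xorTill n := by
  have hmod : ∀ m : Int, PySem.Int.mod m 4 = m % 4 :=
    fun m => PySem.Int.mod_eq_emod_of_pos (by norm_num)
  have h4 : n % 4 = 0 ∨ n % 4 = 1 ∨ n % 4 = 2 ∨ n % 4 = 3 := by omega
  rcases h4 with h | h | h | h
  · have h' : (n - 1) % 4 = 3 := by omega
    have e1 : xorTill (n - 1) = 0 := by unfold xorTill; rw [hmod]; simp [h']
    have e2 : xorTill n = n := by unfold xorTill; rw [hmod]; simp [h]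
    rw [e1, e2, zero_bxor]
  · have h' : (n - 1) % 4 = 0 := by omega
    obtain ⟨k, hk⟩ : ∃ k, n = 2 * k + 1 := ⟨(n - 1) / 2, by omega⟩
    have e1 : xorTill (n - 1) = n - 1 := by unfold xorTill; rw [hmod]; simp [h']
    have e2 : xorTill n = 1 := by unfold xorTill; rw [hmod]; simp [h]
    have hn1 : n - 1 = 2 * k := by omega
    rw [e1, e2, hn1, hk, bxor_two_mul_succ]
  · have h' : (n - 1) % 4 = 1 := by omega
    obtain ⟨k, hk⟩ : ∃ k, n = 2 * k := ⟨n / 2, by omega⟩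
    have e1 : xorTill (n - 1) = 1 := by unfold xorTill; rw [hmod]; simp [h']
    have e2 : xorTill n = n + 1 := by unfold xorTill; rw [hmod]; simp [h]
    rw [e1, e2, hk, bxor_one_two_mul]
  · have h' : (n - 1) % 4 = 2 := by omega
    have e1 : xorTill (n - 1) = n := by
      unfold xorTill; rw [hmod]; simp [h']
    have e2 : xorTill n = 0 := by unfold xorTill; rw [hmod]; simp [h]
    rw [e1, e2, PySem.Int.bxor_self]

theorem range_xor (m : Int) (k : Nat) (r : Int) :
    (PySem.List.pyRange m (m + k) 1).foldl (fun a j => PySem.Int.bxor a j) r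
      = PySem.Int.bxor r (xorBetween m (m + k - 1)) := by
  induction k with
  | zero =>
      rw [Nat.cast_zero, add_zero, PySem.List.pyRange_one_eq_nil (le_refl m)]
      simp [xorBetween, PySem.Int.bxor_self, PySem.Int.bxor_zero]
  | succ k ih =>
      have hle : m ≤ m + (k : Int) := by omega
      have hcast : m + ((k : Int) + 1) = m + (k : Int) + 1 := by ring
      rw [Nat.cast_add, Nat.cast_one, hcast, PySem.List.pyRange_one_succ_right hle,
        List.foldl_append, ih]
      simp only [List.foldl_cons, List.foldl_nil]
      rw [bxor_assoc]
      congr 1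
      have h1 : m + (k : Int) + 1 - 1 = m + (k : Int) := by ring
      rw [h1]
      unfold xorBetween
      rw [bxor_assoc]
      congr 1
      exact till_step (m + (k : Int))

theorem fold_pairs (m : Int) (hm : m % 2 = 0) (p : Nat) (r : Int) :
    (PySem.List.pyRange m (m + 2 * p) 1).foldl (fun a j => PySem.Int.bxor a j) r
      = PySem.Int.bxor r (if p % 2 = 1 then 1 else 0) := by
  induction p generalizing r with
  | zero =>
      rw [Nat.cast_zero, mul_zero, add_zero, PySem.List.pyRange_one_eq_nil (le_refl m)]
      simp [PySem.Int.bxor_zero]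
  | succ p ih =>
      have e1 : m + 2 * ((p : Int) + 1) = (m + 2 * p + 1) + 1 := by ring
      have hle1 : m ≤ m + 2 * (p : Int) := by omega
      have hle2 : m ≤ m + 2 * (p : Int) + 1 := by omega
      rw [Nat.cast_add, Nat.cast_one, e1, PySem.List.pyRange_one_succ_right hle2,
        PySem.List.pyRange_one_succ_right hle1, List.foldl_append, List.foldl_append, ih]
      simp only [List.foldl_cons, List.foldl_nil]
      obtain ⟨k, hk⟩ : ∃ k, m + 2 * (p : Int) = 2 * k := ⟨m / 2 + p, by omega⟩
      rw [bxor_assoc, bxor_assoc, hk, bxor_two_mul_succ]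
      rcases Nat.even_or_odd p with hp | hp
      · have h2 : (p + 1) % 2 = 1 := by
          have := Nat.even_iff.mp hp; omega
        rw [if_neg (by have := Nat.even_iff.mp hp; omega : ¬ (p % 2 = 1)), if_pos h2, zero_bxor]
      · have h1 : p % 2 = 1 := Nat.odd_iff.mp hp
        rw [if_pos h1, if_neg (by omega : ¬ ((p + 1) % 2 = 1)), PySem.Int.bxor_self,
          PySem.Int.bxor_zero]

theorem bxor_rot (x h1 : Int) :
    PySem.Int.bxor (PySem.Int.bxor x h1) 1 = PySem.Int.bxor (PySem.Int.bxor x 1) h1 := by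
  rw [bxor_assoc, bxor_assoc, PySem.Int.bxor_comm h1 1]

-- B's per-range computation equals A's xorBetween, via the XOR-fold over the range.
theorem row_eq (lo hi res : Int) (h : lo ≤ hi) :
    (let res1 := if PySem.Int.mod lo 2 = 1 then PySem.Int.bxor res lo else res
     let lo1 := if PySem.Int.mod lo 2 = 1 then lo + 1 else lo
     let res2 := if PySem.Int.mod hi 2 = 0 then PySem.Int.bxor res1 hi else res1
     let hi1 := if PySem.Int.mod hi 2 = 0 then hi - 1 else hi
     if lo1 ≤ hi1 ∧ PySem.Int.mod (PySem.Int.floordiv (hi1 + 1 - lo1) 2) 2 = 1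
     then PySem.Int.bxor res2 1 else res2)
      = PySem.Int.bxor res (xorBetween lo hi) := by
  have hmod2 : ∀ a : Int, PySem.Int.mod a 2 = a % 2 :=
    fun a => PySem.Int.mod_eq_emod_of_pos (by norm_num)
  have hdiv2 : ∀ a : Int, PySem.Int.floordiv a 2 = a / 2 :=
    fun a => PySem.Int.floordiv_eq_ediv_of_pos (by norm_num)
  have hfold :
      (PySem.List.pyRange lo (hi + 1) 1).foldl (fun a j => PySem.Int.bxor a j) res
        = PySem.Int.bxor res (xorBetween lo hi) := by
    have hb : hi + 1 = lo + ((hi + 1 - lo).toNat : Int) := by omega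
    have he : lo + ((hi + 1 - lo).toNat : Int) - 1 = hi := by omega
    rw [hb, range_xor lo (hi + 1 - lo).toNat res, he]
  rw [← hfold]
  simp only [hmod2, hdiv2]
  rcases Int.emod_two_eq_zero_or_one lo with hlo | hlo <;>
    rcases Int.emod_two_eq_zero_or_one hi with hhi | hhi
  · -- lo even, hi even: pairs then a trailing single element hi
    have ha : ¬ (lo % 2 = 1) := by omega
    obtain ⟨p, hp⟩ : ∃ p : Nat, hi = lo + 2 * p := ⟨((hi - lo) / 2).toNat, by omega⟩
    rw [PySem.List.pyRange_one_succ_right h, List.foldl_append,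
      show PySem.List.pyRange lo hi 1 = PySem.List.pyRange lo (lo + 2 * p) 1 from by rw [hp],
      fold_pairs lo hlo p res]
    simp only [List.foldl_cons, List.foldl_nil, if_neg ha, if_pos hhi]
    by_cases hp2 : p % 2 = 1
    · have hcond : lo ≤ hi - 1 ∧ (hi - 1 + 1 - lo) / 2 % 2 = 1 := ⟨by omega, by omega⟩
      rw [if_pos hcond, if_pos hp2]
      exact bxor_rot res hi
    · rw [if_neg (fun hc => absurd hc.2 (by omega)), if_neg hp2, PySem.Int.bxor_zero]
  · -- lo even, hi odd: a pure run of pairs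
    have ha : ¬ (lo % 2 = 1) := by omega
    have hb : ¬ (hi % 2 = 0) := by omega
    obtain ⟨p, hp⟩ : ∃ p : Nat, hi + 1 = lo + 2 * p := ⟨((hi + 1 - lo) / 2).toNat, by omega⟩
    rw [show PySem.List.pyRange lo (hi + 1) 1 = PySem.List.pyRange lo (lo + 2 * p) 1 from by
        rw [hp], fold_pairs lo hlo p res]
    simp only [if_neg ha, if_neg hb]
    by_cases hp2 : p % 2 = 1
    · have hcond : lo ≤ hi ∧ (hi + 1 - lo) / 2 % 2 = 1 := ⟨h, by omega⟩
      rw [if_pos hcond, if_pos hp2]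
    · rw [if_neg (fun hc => absurd hc.2 (by omega)), if_neg hp2, PySem.Int.bxor_zero]
  · -- lo odd, hi even: leading single lo, pairs, trailing single hi
    have hlt : lo < hi := by omega
    obtain ⟨p, hp⟩ : ∃ p : Nat, hi = (lo + 1) + 2 * p := ⟨((hi - lo - 1) / 2).toNat, by omega⟩
    have hlo1 : (lo + 1) % 2 = 0 := by omega
    rw [PySem.List.pyRange_one_succ_right (le_of_lt hlt), List.foldl_append,
      PySem.List.pyRange_one_cons hlt]
    simp only [List.foldl_cons, List.foldl_nil]
    rw [show PySem.List.pyRange (lo + 1) hi 1 = PySem.List.pyRange (lo + 1) ((lo + 1) + 2 * p) 1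
        from by rw [hp], fold_pairs (lo + 1) hlo1 p (PySem.Int.bxor res lo)]
    simp only [if_pos hlo, if_pos hhi]
    by_cases hp2 : p % 2 = 1
    · have hcond : lo + 1 ≤ hi - 1 ∧ (hi - 1 + 1 - (lo + 1)) / 2 % 2 = 1 := ⟨by omega, by omega⟩
      rw [if_pos hcond, if_pos hp2]
      exact bxor_rot (PySem.Int.bxor res lo) hi
    · rw [if_neg (fun hc => absurd hc.2 (by omega)), if_neg hp2, PySem.Int.bxor_zero]
  · -- lo odd, hi odd: leading single lo then pairs
    have hb : ¬ (hi % 2 = 0) := by omega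
    obtain ⟨p, hp⟩ : ∃ p : Nat, hi + 1 = (lo + 1) + 2 * p := ⟨((hi - lo) / 2).toNat, by omega⟩
    have hlo1 : (lo + 1) % 2 = 0 := by omega
    rw [PySem.List.pyRange_one_cons (by omega : lo < hi + 1)]
    simp only [List.foldl_cons]
    rw [show PySem.List.pyRange (lo + 1) (hi + 1) 1
          = PySem.List.pyRange (lo + 1) ((lo + 1) + 2 * p) 1 from by rw [hp],
      fold_pairs (lo + 1) hlo1 p (PySem.Int.bxor res lo)]
    simp only [if_pos hlo, if_neg hb]
    by_cases hp2 : p % 2 = 1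
    · have hcond : lo + 1 ≤ hi ∧ (hi + 1 - (lo + 1)) / 2 % 2 = 1 := ⟨by omega, by omega⟩
      rw [if_pos hcond, if_pos hp2]
    · rw [if_neg (fun hc => absurd hc.2 (by omega)), if_neg hp2, PySem.Int.bxor_zero]

theorem solution_eq (start L : Int) :
    solution start L = solution_alt start L := by
  unfold solution solution_alt
  rw [PySem.List.foldl_append_singleton_eq_map, List.nil_append, List.foldl_map]
  refine (PySem.List.foldl_congr_mem _ _ _ _ ?_).symm
  intro r i hi
  have hmem := (PySem.List.mem_pyRange_one).1 hi
  have h : start + i * L ≤ start + i * L + L - 1 - i := by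
    rcases hmem with ⟨h0, h1⟩; omega
  have := row_eq (start + i * L) (start + i * L + L - 1 - i) r h
  simp only [] at this ⊢
  rw [this]
  congr 1
  have e : start + i * L + L - 1 - i = start + i * L + L - i - 1 := by ring
  rw [e]

-- ===== VERDICT (by name: the statement is the Claim_ definition above) =====
theorem solution_spec : Claim_equal_solution := by
  intro start length _
  unfold Spec_solution
  exact solution_eq start length
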